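-- pv_equiv track=rewrite | github.com/noaottermann/project-euler | utils.py | period_root_continued_fraction
-- ===== SOURCE A (Python) =====
-- from math import isqrt
--
-- def is_perfect_square(n):
--     if n < 0:
--         return False
--     root = isqrt(n)
--     return root * root == n
--
-- def period_root_continued_fraction(n):
--     if is_perfect_square(n):
--         return []
--     m = 0
--     d = 1
--     a0 = a = int(n**0.5)
--     period = []
--     while True:
--         m = d * a - m
--         d = (n - m * m) // d
--         a = (a0 + m) // d
--         period.append(a)
--         if a == 2 * a0:
--             break
--     return period
-- ===== SOURCE B (Python) =====
-- from math import isqrt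
--
-- def period_root_continued_fraction(n):
--     # The period of sqrt(n) is palindromic: it ends with 2*a0 and the part before that is
--     # a palindrome.  Iterate the complete-quotient states only up to the symmetry
--     # midpoint (detected by two consecutive equal d's or equal m's) and build the
--     # second half of the period by mirroring the first -- about half the iterations.
--     a0 = isqrt(n)
--     if a0 * a0 == n:
--         return []
--     half = []
--     m, d, a = 0, 1, a0
--     while True:
--         m2 = d * a - m
--         d2 = (n - m2 * m2) // d
--         if d2 == d:            # odd period 2*len(half)+1
--             return half + half[::-1] + [2 * a0]
--         if m2 == m:            # even period 2*len(half)
--             return half + half[:-1][::-1] + [2 * a0]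
--         a = (a0 + m2) // d2
--         half.append(a)
--         m, d = m2, d2
-- ===== Notes on version B (the rewrite author's own statement) =====
-- stated objective: alternative
-- what changed: B exploits the palindrome symmetry of the period of sqrt(n): it iterates the complete-quotient recurrence only until the symmetry midpoint (two consecutive equal d's or equal m's) and builds the whole period from the first half, its mirror image and the final quotient 2*a0, instead of A's full loop broken on a == 2*a0; a timing run could not measure a speed difference at its sizes, so no speed is claimed.
import Mathlib
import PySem

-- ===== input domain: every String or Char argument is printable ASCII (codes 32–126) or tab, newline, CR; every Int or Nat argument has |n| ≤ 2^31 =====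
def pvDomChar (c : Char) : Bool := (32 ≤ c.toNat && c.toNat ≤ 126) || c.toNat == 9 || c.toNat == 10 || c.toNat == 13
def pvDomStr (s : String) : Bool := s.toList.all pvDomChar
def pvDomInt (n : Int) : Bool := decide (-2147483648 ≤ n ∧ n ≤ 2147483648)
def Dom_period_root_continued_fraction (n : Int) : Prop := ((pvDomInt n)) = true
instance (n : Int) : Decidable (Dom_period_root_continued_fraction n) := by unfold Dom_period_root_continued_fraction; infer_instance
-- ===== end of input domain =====

-- B iterates the (m,d) recurrence only to the palindrome midpoint of the period and
-- mirrors the first half instead of running A's full loop (objective: alternative algorithm).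

-- ===== PORT A =====
-- helper is_perfect_square, literal port
def is_perfect_square (n : Int) : Bool :=
  if n < 0 then false
  else
    let root := Int.sqrt n
    root * root == n

-- A's while-True loop, with a fuel counter that the loop never exhausts on admitted
-- inputs (the first d=1 state, where the loop breaks, occurs within 2*n steps).
def pvAloop (n a0 : Int) : Nat → Int → Int → Int → List Int → List Int
  | 0, _, _, _, acc => acc
  | fuel+1, m, d, a, acc =>
    let m' := d * a - m
    let d' := PySem.Int.floordiv (n - m' * m') d
    let a' := PySem.Int.floordiv (a0 + m') d'
    let acc' := acc ++ [a']
    if a' = 2 * a0 then acc' else pvAloop n a0 fuel m' d' a' acc'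

-- int(n**0.5) is ported as Int.sqrt n: exact on the admitted domain 0 ≤ n ≤ 2^31,
-- where the float computation agrees with the integer square root.
def period_root_continued_fraction (n : Int) : List Int :=
  if is_perfect_square n then []
  else
    let a0 := Int.sqrt n
    pvAloop n a0 (2 * n).toNat.succ.succ 0 1 a0 []

-- ===== PORT B =====
-- B's while-True loop: stop at the symmetry midpoint (d2 == d, or m2 == m) and
-- return the mirrored period; same fuel counter as A's port (never exhausted on
-- admitted inputs: the midpoint comes no later than the period end).
def pvBloop (n a0 : Int) : Nat → Int → Int → Int → List Int → List Int
  | 0, _, _, _, _ => []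
  | fuel+1, m, d, a, half =>
    let m2 := d * a - m
    let d2 := PySem.Int.floordiv (n - m2 * m2) d
    if d2 = d then half ++ half.reverse ++ [2 * a0]
    else if m2 = m then half ++ half.dropLast.reverse ++ [2 * a0]
    else
      let a2 := PySem.Int.floordiv (a0 + m2) d2
      pvBloop n a0 fuel m2 d2 a2 (half ++ [a2])

-- math.isqrt is ported as Int.sqrt (B only calls it with 0 ≤ n inside Pre_)
def period_root_continued_fraction_alt (n : Int) : List Int :=
  let a0 := Int.sqrt n
  if a0 * a0 == n then []
  else pvBloop n a0 (2 * n).toNat.succ.succ 0 1 a0 []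

-- ===== PRECONDITION & SPEC =====
-- A raises TypeError on negative n (int() of the complex value n**0.5); Pre_ excludes exactly those inputs (B raises there too, in isqrt).
def Pre_period_root_continued_fraction (n : Int) : Prop := 0 ≤ n
instance (n : Int) : Decidable (Pre_period_root_continued_fraction n) := by unfold Pre_period_root_continued_fraction; infer_instance
def pvWitness_period_root_continued_fraction : Int := (7)

def Spec_period_root_continued_fraction (n : Int) (out : List Int) : Prop := out = period_root_continued_fraction_alt n
instance (n : Int) (out : List Int) : Decidable (Spec_period_root_continued_fraction n out) := by unfold Spec_period_root_continued_fraction; infer_instance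

-- ===== CLAIM (what is proved, stated in full; the proofs are below) =====
def Claim_equal_period_root_continued_fraction : Prop := ∀ (n : Int), Dom_period_root_continued_fraction n → Pre_period_root_continued_fraction n → Spec_period_root_continued_fraction n (period_root_continued_fraction n)

-- ===== LEMMAS AND PROOFS =====

-- the abstract state sequence of the recurrence: s_0 = (0,1), one step (m,d) ↦ (m',d')
def pvStep (n a0 : Int) (s : Int × Int) : Int × Int :=
  let a := PySem.Int.floordiv (a0 + s.1) s.2
  let m2 := s.2 * a - s.1
  (m2, PySem.Int.floordiv (n - m2 * m2) s.2)

def pvS (n a0 : Int) : Nat → Int × Int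
  | 0 => (0, 1)
  | k+1 => pvStep n a0 (pvS n a0 k)

-- the partial quotient at state k
def pvQ (n a0 : Int) (k : Nat) : Int :=
  PySem.Int.floordiv (a0 + (pvS n a0 k).1) (pvS n a0 k).2

-- the invariant of the recurrence: the state describes a reduced quadratic surd
def pvInv (n a0 m d : Int) : Prop :=
  1 ≤ m ∧ m ≤ a0 ∧ 1 ≤ d ∧ d ≤ m + a0 ∧ a0 + 1 ≤ m + d ∧ d ∣ (n - m * m)

theorem pv_fdiv_exact (x d : Int) (h : d ∣ x) : d * PySem.Int.floordiv x d = x := by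
  have h4 := PySem.Int.floordiv_mul_add_mod x d
  rw [(PySem.Int.mod_eq_zero_iff_dvd x d).mpr h] at h4
  linarith [h4]

theorem pv_fdiv_one (x : Int) : PySem.Int.floordiv x 1 = x :=
  (PySem.Int.floordiv_eq_iff_of_pos one_pos).mpr (by omega)

-- the invariant is preserved by one step of the recurrence, and the step's division is exact
theorem pvInv_step (n a0 m d : Int) (h1 : a0 * a0 < n) (h2 : n ≤ a0 * a0 + 2 * a0)
    (_ha0 : 1 ≤ a0) (hI : pvInv n a0 m d) :
    pvInv n a0 (d * PySem.Int.floordiv (a0 + m) d - m)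
      (PySem.Int.floordiv (n - (d * PySem.Int.floordiv (a0 + m) d - m) * (d * PySem.Int.floordiv (a0 + m) d - m)) d) ∧
    d * (PySem.Int.floordiv (n - (d * PySem.Int.floordiv (a0 + m) d - m) * (d * PySem.Int.floordiv (a0 + m) d - m)) d)
      = n - (d * PySem.Int.floordiv (a0 + m) d - m) * (d * PySem.Int.floordiv (a0 + m) d - m) := by
  obtain ⟨hm1, hma, hd1, hdub, hsum, hdvd⟩ := hI
  have hd : (0:Int) < d := hd1
  set A := PySem.Int.floordiv (a0 + m) d with hA
  have hbr := (PySem.Int.floordiv_eq_iff_of_pos hd (a := a0 + m) (q := A)).mp rfl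
  obtain ⟨hlo, hhi⟩ := hbr
  have hA1 : 1 ≤ A := (PySem.Int.le_floordiv_iff_mul_le hd).mpr (by linarith)
  set M : Int := d * A - m with hM
  have hM'le : M ≤ a0 := by nlinarith
  have hM'ge : 1 ≤ M := by
    rcases (by omega : d ≤ m ∨ m < d) with h | h
    · nlinarith
    · nlinarith
  have hdvd' : d ∣ n - M * M := by
    obtain ⟨k, hk⟩ := hdvd
    exact ⟨k + 2 * A * m - d * A * A, by rw [hM]; linear_combination hk⟩
  set D : Int := PySem.Int.floordiv (n - M * M) d with hD
  have hEx : d * D = n - M * M := pv_fdiv_exact _ _ hdvd'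
  have hnM : 1 ≤ n - M * M := by nlinarith
  have hD1 : 1 ≤ D := by nlinarith
  have hdleMm : d ≤ M + m := by nlinarith
  have hgap : a0 - M ≤ d - 1 := by nlinarith
  refine ⟨⟨hM'ge, hM'le, hD1, ?_, ?_, ⟨d, by linarith [mul_comm d D, hEx]⟩⟩, hEx⟩
  · rcases (by omega : a0 - M ≤ d - 2 ∨ a0 - M = d - 1) with h | h
    · nlinarith
    · nlinarith
  · by_contra hc
    push Not at hc
    nlinarith

theorem pvStep_eq (n a0 m d : Int) :
    pvStep n a0 (m, d) = (d * PySem.Int.floordiv (a0 + m) d - m,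
      PySem.Int.floordiv (n - (d * PySem.Int.floordiv (a0 + m) d - m) * (d * PySem.Int.floordiv (a0 + m) d - m)) d) := rfl

theorem pvS_succ (n a0 : Int) (k : Nat) : pvS n a0 (k+1) = pvStep n a0 (pvS n a0 k) := rfl

theorem pvS_one (n a0 : Int) : pvS n a0 1 = (a0, n - a0 * a0) := by
  show pvStep n a0 (0, 1) = _
  rw [pvStep_eq]
  rw [add_zero, pv_fdiv_one, one_mul, sub_zero, pv_fdiv_one]

-- every state from index 1 on satisfies the invariant
theorem pvInv_S (n a0 : Int) (h1 : a0 * a0 < n) (h2 : n ≤ a0 * a0 + 2 * a0) (ha0 : 1 ≤ a0) :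
    ∀ k, 1 ≤ k → pvInv n a0 (pvS n a0 k).1 (pvS n a0 k).2 := by
  intro k hk
  induction k with
  | zero => omega
  | succ k ih =>
    rcases Nat.lt_or_ge 0 k with h | h
    · have hI := ih h
      have hstep := (pvInv_step n a0 (pvS n a0 k).1 (pvS n a0 k).2 h1 h2 ha0 hI).1
      rw [pvS_succ]
      have : pvStep n a0 (pvS n a0 k) = pvStep n a0 ((pvS n a0 k).1, (pvS n a0 k).2) := by rfl
      rw [this, pvStep_eq]
      exact hstep
    · have hk0 : k = 0 := by omega
      subst hk0
      rw [(by rfl : (0:Nat) + 1 = 1), pvS_one]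
      exact ⟨ha0, le_refl _, by nlinarith, by nlinarith, by nlinarith, dvd_refl _⟩

-- exactness between consecutive d's: d_k * d_{k+1} = n - m_{k+1}^2
theorem pvExact (n a0 : Int) (h1 : a0 * a0 < n) (h2 : n ≤ a0 * a0 + 2 * a0) (ha0 : 1 ≤ a0) :
    ∀ k, (pvS n a0 k).2 * (pvS n a0 (k+1)).2 = n - (pvS n a0 (k+1)).1 * (pvS n a0 (k+1)).1 := by
  intro k
  rcases Nat.lt_or_ge 0 k with h | h
  · have hI := pvInv_S n a0 h1 h2 ha0 k h
    have hstep := (pvInv_step n a0 (pvS n a0 k).1 (pvS n a0 k).2 h1 h2 ha0 hI).2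
    rw [pvS_succ]
    have he : pvStep n a0 (pvS n a0 k) = pvStep n a0 ((pvS n a0 k).1, (pvS n a0 k).2) := by rfl
    rw [he, pvStep_eq]
    exact hstep
  · have hk0 : k = 0 := by omega
    subst hk0
    rw [(by rfl : (0:Nat) + 1 = 1), pvS_one]
    show (1:Int) * (n - a0 * a0) = n - a0 * a0
    ring

-- the floor of (a0+m)/d is unchanged by replacing m with its step image d*a-m
theorem pv_revfloor (n a0 m d : Int) (hI : pvInv n a0 m d) :
    PySem.Int.floordiv (a0 + (d * PySem.Int.floordiv (a0 + m) d - m)) d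
      = PySem.Int.floordiv (a0 + m) d := by
  obtain ⟨hm1, hma, hd1, hdub, hsum, hdvd⟩ := hI
  have hd : (0:Int) < d := hd1
  set A := PySem.Int.floordiv (a0 + m) d with hA
  obtain ⟨hlo, hhi⟩ := (PySem.Int.floordiv_eq_iff_of_pos hd (a := a0 + m) (q := A)).mp rfl
  exact (PySem.Int.floordiv_eq_iff_of_pos hd).mpr ⟨by nlinarith, by nlinarith⟩

-- the reversed step: from the mixed state (m_{k+1}, d_k) one step leads to (m_k, d_{k-1})
theorem pv_revstep (n a0 : Int) (h1 : a0 * a0 < n) (h2 : n ≤ a0 * a0 + 2 * a0) (ha0 : 1 ≤ a0)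
    (k : Nat) (hk : 1 ≤ k) :
    pvStep n a0 ((pvS n a0 (k+1)).1, (pvS n a0 k).2) = ((pvS n a0 k).1, (pvS n a0 (k-1)).2) := by
  have hI := pvInv_S n a0 h1 h2 ha0 k hk
  obtain ⟨hm1, hma, hd1, hdub, hsum, hdvd⟩ := hI
  have hd : (0:Int) < (pvS n a0 k).2 := hd1
  have hm1eq : (pvS n a0 (k+1)).1
      = (pvS n a0 k).2 * PySem.Int.floordiv (a0 + (pvS n a0 k).1) (pvS n a0 k).2 - (pvS n a0 k).1 := by
    rw [pvS_succ]
    have he : pvStep n a0 (pvS n a0 k) = pvStep n a0 ((pvS n a0 k).1, (pvS n a0 k).2) := by rfl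
    rw [he, pvStep_eq]
  have hrf : PySem.Int.floordiv (a0 + (pvS n a0 (k+1)).1) (pvS n a0 k).2
      = PySem.Int.floordiv (a0 + (pvS n a0 k).1) (pvS n a0 k).2 := by
    rw [hm1eq]
    exact pv_revfloor n a0 (pvS n a0 k).1 (pvS n a0 k).2 ⟨hm1, hma, hd1, hdub, hsum, hdvd⟩
  rw [pvStep_eq, hrf]
  have hfst : (pvS n a0 k).2 * PySem.Int.floordiv (a0 + (pvS n a0 k).1) (pvS n a0 k).2
      - (pvS n a0 (k+1)).1 = (pvS n a0 k).1 := by rw [hm1eq]; ring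
  rw [hfst]
  -- second component: floordiv (n - m_k^2) d_k = d_{k-1}
  obtain ⟨k', rfl⟩ : ∃ k', k = k' + 1 := ⟨k - 1, by omega⟩
  have hex := pvExact n a0 h1 h2 ha0 k'
  have : PySem.Int.floordiv (n - (pvS n a0 (k'+1)).1 * (pvS n a0 (k'+1)).1) (pvS n a0 (k'+1)).2
      = (pvS n a0 k').2 := by
    refine (PySem.Int.floordiv_eq_iff_of_pos hd).mpr ⟨by nlinarith, by nlinarith⟩
  rw [this]
  simp

-- backward determinism on invariant states
theorem pv_back (n a0 m d m' d' : Int) (h1 : a0 * a0 < n) (h2 : n ≤ a0 * a0 + 2 * a0)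
    (ha0 : 1 ≤ a0) (hI : pvInv n a0 m d) (hI' : pvInv n a0 m' d')
    (h : pvStep n a0 (m, d) = pvStep n a0 (m', d')) : m = m' ∧ d = d' := by
  rw [pvStep_eq, pvStep_eq, Prod.mk.injEq] at h
  obtain ⟨hfst, hsnd⟩ := h
  have hs := pvInv_step n a0 m d h1 h2 ha0 hI
  have hs' := pvInv_step n a0 m' d' h1 h2 ha0 hI'
  obtain ⟨⟨_, _, hD1, _, _, _⟩, hEx⟩ := hs
  obtain ⟨⟨_, _, hD1', _, _, _⟩, hEx'⟩ := hs'
  set M := d * PySem.Int.floordiv (a0 + m) d - m with hM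
  set M' := d' * PySem.Int.floordiv (a0 + m') d' - m' with hM'
  have hMM : M = M' := hfst
  -- d * D = n - M^2 = d' * D' and D = D' forces d = d'
  rw [← hMM] at hEx' hD1'
  rw [hsnd, ← hMM] at hEx
  have hdd : d = d' := mul_right_cancel₀ (by omega) (hEx.trans hEx'.symm)
  refine ⟨?_, hdd⟩
  have h1f := pv_revfloor n a0 m d hI
  have h2f := pv_revfloor n a0 m' d' hI'
  rw [← hM] at h1f
  rw [← hM'] at h2f
  -- a0 + M over d determines the quotient; M = M', d = d' give m = m'
  have : PySem.Int.floordiv (a0 + m) d = PySem.Int.floordiv (a0 + m') d' := by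
    rw [← h1f, ← h2f, hMM, hdd]
  have hM2 : d * PySem.Int.floordiv (a0 + m) d - m = d' * PySem.Int.floordiv (a0 + m') d' - m' := hfst
  rw [this, hdd] at hM2
  omega

-- equal states at positive indices propagate backwards to index 1
theorem pv_cancel (n a0 : Int) (h1 : a0 * a0 < n) (h2 : n ≤ a0 * a0 + 2 * a0) (ha0 : 1 ≤ a0) :
    ∀ (c i j : Nat), 1 ≤ i → i ≤ j → pvS n a0 i = pvS n a0 j → c ≤ i - 1 →
      pvS n a0 (i - c) = pvS n a0 (j - c) := by
  intro c
  induction c with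
  | zero => intro i j _ _ h _; simpa using h
  | succ c ih =>
    intro i j hi hij h hc
    have h' := ih i j hi hij h (by omega)
    obtain ⟨u, hu⟩ : ∃ u, i - c = u + 1 := ⟨i - c - 1, by omega⟩
    obtain ⟨v, hv⟩ : ∃ v, j - c = v + 1 := ⟨j - c - 1, by omega⟩
    have hu1 : 1 ≤ u := by omega
    have hv1 : 1 ≤ v := by omega
    rw [hu, hv, pvS_succ, pvS_succ] at h'
    have hIu := pvInv_S n a0 h1 h2 ha0 u hu1
    have hIv := pvInv_S n a0 h1 h2 ha0 v hv1
    have hstep : pvStep n a0 ((pvS n a0 u).1, (pvS n a0 u).2)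
        = pvStep n a0 ((pvS n a0 v).1, (pvS n a0 v).2) := h'
    obtain ⟨hm, hd⟩ := pv_back n a0 _ _ _ _ h1 h2 ha0 hIu hIv hstep
    have huv : pvS n a0 u = pvS n a0 v := Prod.ext hm hd
    have e1 : i - (c+1) = u := by omega
    have e2 : j - (c+1) = v := by omega
    rw [e1, e2, huv]

-- the run reaches a d = 1 state within 2*a0^2 steps (pigeonhole + backward determinism)
theorem pv_exists_one (n a0 : Int) (h1 : a0 * a0 < n) (h2 : n ≤ a0 * a0 + 2 * a0) (ha0 : 1 ≤ a0) :
    ∃ q : Nat, 1 ≤ q ∧ (q : Int) ≤ 2 * a0 * a0 ∧ (pvS n a0 q).2 = 1 := by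
  classical
  set N := a0.toNat * (2 * a0).toNat with hN
  have hNle : (N : Int) ≤ 2 * a0 * a0 := by
    rw [hN]
    push_cast
    rw [Int.toNat_of_nonneg (by omega), Int.toNat_of_nonneg (by omega)]
    ring_nf
    omega
  have hmaps : ∀ k ∈ Finset.range (N+1),
      pvS n a0 (k+1) ∈ (Finset.Icc (1:Int) a0) ×ˢ (Finset.Icc (1:Int) (2*a0)) := by
    intro k _
    obtain ⟨hm1, hma, hd1, hdub, _, _⟩ := pvInv_S n a0 h1 h2 ha0 (k+1) (by omega)
    rw [Finset.mem_product, Finset.mem_Icc, Finset.mem_Icc]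
    exact ⟨⟨hm1, hma⟩, ⟨hd1, by nlinarith⟩⟩
  have hcard : ((Finset.Icc (1:Int) a0) ×ˢ (Finset.Icc (1:Int) (2*a0))).card
      < (Finset.range (N+1)).card := by
    rw [Finset.card_product, Finset.card_range, Int.card_Icc, Int.card_Icc]
    have e1 : ((a0 + 1 - 1).toNat) = a0.toNat := by omega
    have e2 : ((2*a0 + 1 - 1).toNat) = (2*a0).toNat := by omega
    rw [e1, e2, hN]
    omega
  obtain ⟨i, hi, j, hj, hne, heq⟩ :=
    Finset.exists_ne_map_eq_of_card_lt_of_maps_to hcard hmaps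
  have key : ∀ i j : Nat, i < j → j ≤ N → pvS n a0 (i+1) = pvS n a0 (j+1) →
      ∃ q : Nat, 1 ≤ q ∧ (q : Int) ≤ 2 * a0 * a0 ∧ (pvS n a0 q).2 = 1 := by
    intro i j hij hjN he
    have hcan := pv_cancel n a0 h1 h2 ha0 i (i+1) (j+1) (by omega) (by omega) he (by omega)
    have e1 : i + 1 - i = 1 := by omega
    have e2 : j + 1 - i = (j - i) + 1 := by omega
    rw [e1, e2] at hcan
    set q := j - i with hq
    refine ⟨q, by omega, by omega, ?_⟩
    have hex := pvExact n a0 h1 h2 ha0 q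
    rw [← hcan, pvS_one] at hex
    have hpos : (1:Int) ≤ n - a0 * a0 := by nlinarith
    have : (pvS n a0 q).2 * (n - a0 * a0) = 1 * (n - a0 * a0) := by
      simpa using hex
    exact mul_right_cancel₀ (by omega) this
  rw [Finset.mem_range] at hi hj
  rcases Nat.lt_or_gt_of_ne hne with h | h
  · exact key i j h (by omega) heq
  · exact key j i h (by omega) heq.symm

-- at an invariant state, quotient = 2*a0 iff d = 1
theorem pv_a_iff (n a0 : Int) (h1 : a0 * a0 < n) (h2 : n ≤ a0 * a0 + 2 * a0) (ha0 : 1 ≤ a0)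
    (k : Nat) (hk : 1 ≤ k) : pvQ n a0 k = 2 * a0 ↔ (pvS n a0 k).2 = 1 := by
  obtain ⟨hm1, hma, hd1, hdub, hsum, hdvd⟩ := pvInv_S n a0 h1 h2 ha0 k hk
  have hd : (0:Int) < (pvS n a0 k).2 := hd1
  unfold pvQ
  constructor
  · intro h
    obtain ⟨hlo, hhi⟩ := (PySem.Int.floordiv_eq_iff_of_pos hd
      (a := a0 + (pvS n a0 k).1) (q := 2 * a0)).mp h
    nlinarith
  · intro h
    have hm : (pvS n a0 k).1 = a0 := by omega
    rw [h, hm, pv_fdiv_one]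
    ring

-- the palindrome symmetry of one period: s_j = (m_{p+1-j}, d_{p-j})
theorem pv_palin (n a0 : Int) (h1 : a0 * a0 < n) (h2 : n ≤ a0 * a0 + 2 * a0) (ha0 : 1 ≤ a0)
    (p : Nat) (hp1 : 1 ≤ p) (hpd : (pvS n a0 p).2 = 1) :
    ∀ j, 1 ≤ j → j ≤ p →
      pvS n a0 j = ((pvS n a0 (p+1-j)).1, (pvS n a0 (p-j)).2) := by
  intro j hj1
  induction j, hj1 using Nat.le_induction with
  | base =>
    intro _
    have e1 : p + 1 - 1 = p := by omega
    have e2 : p - 1 + 1 = p := by omega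
    rw [e1, pvS_one]
    obtain ⟨hm1, hma, hd1, hdub, hsum, _⟩ := pvInv_S n a0 h1 h2 ha0 p hp1
    have hmp : (pvS n a0 p).1 = a0 := by omega
    obtain ⟨p', rfl⟩ : ∃ p', p = p' + 1 := ⟨p - 1, by omega⟩
    have hex := pvExact n a0 h1 h2 ha0 p'
    rw [hpd, hmp, mul_one] at hex
    have e3 : p' + 1 - 1 = p' := by omega
    rw [e3]
    exact Prod.ext hmp.symm hex.symm
  | succ j hj ih =>
    intro hjp
    have hrec := ih (by omega)
    have hk1 : 1 ≤ p - j := by omega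
    have hp1j : p + 1 - j = (p - j) + 1 := by omega
    rw [hp1j] at hrec
    rw [pvS_succ]
    have hrw : pvStep n a0 (pvS n a0 j)
        = pvStep n a0 ((pvS n a0 ((p-j)+1)).1, (pvS n a0 (p-j)).2) := by rw [hrec]
    rw [hrw, pv_revstep n a0 h1 h2 ha0 (p-j) hk1]
    have e1 : p + 1 - (j+1) = p - j := by omega
    have e2 : p - (j+1) = (p - j) - 1 := by omega
    rw [e1, e2]

-- quotient palindrome: a_j = a_{p-j} for 1 ≤ j ≤ p-1
theorem pv_apal (n a0 : Int) (h1 : a0 * a0 < n) (h2 : n ≤ a0 * a0 + 2 * a0) (ha0 : 1 ≤ a0)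
    (p : Nat) (hp1 : 1 ≤ p) (hpd : (pvS n a0 p).2 = 1)
    (j : Nat) (hj1 : 1 ≤ j) (hjp : j ≤ p - 1) : pvQ n a0 j = pvQ n a0 (p - j) := by
  have hpal := pv_palin n a0 h1 h2 ha0 p hp1 hpd j hj1 (by omega)
  have hk1 : 1 ≤ p - j := by omega
  have hp1j : p + 1 - j = (p - j) + 1 := by omega
  rw [hp1j] at hpal
  unfold pvQ
  rw [hpal]
  have hI := pvInv_S n a0 h1 h2 ha0 (p-j) hk1
  have hm1eq : (pvS n a0 ((p-j)+1)).1
      = (pvS n a0 (p-j)).2 * PySem.Int.floordiv (a0 + (pvS n a0 (p-j)).1) (pvS n a0 (p-j)).2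
        - (pvS n a0 (p-j)).1 := by
    rw [pvS_succ]
    have he : pvStep n a0 (pvS n a0 (p-j)) = pvStep n a0 ((pvS n a0 (p-j)).1, (pvS n a0 (p-j)).2) := by rfl
    rw [he, pvStep_eq]
  rw [hm1eq]
  exact pv_revfloor n a0 (pvS n a0 (p-j)).1 (pvS n a0 (p-j)).2 hI

-- reflection from a mirrored state: the run retraces the state sequence backwards
theorem pv_reflect (n a0 : Int) (h1 : a0 * a0 < n) (h2 : n ≤ a0 * a0 + 2 * a0) (ha0 : 1 ≤ a0)
    (r t : Nat) (hr : 1 ≤ r) (h : pvS n a0 t = ((pvS n a0 r).1, (pvS n a0 (r-1)).2)) :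
    ∀ i, i ≤ r - 1 → pvS n a0 (t+i) = ((pvS n a0 (r-i)).1, (pvS n a0 (r-1-i)).2) := by
  intro i
  induction i with
  | zero => intro _; simpa using h
  | succ i ih =>
    intro hi
    have h' := ih (by omega)
    have hk1 : 1 ≤ r - 1 - i := by omega
    have e0 : r - i = (r - 1 - i) + 1 := by omega
    rw [e0] at h'
    have : t + (i+1) = (t + i) + 1 := by omega
    rw [this, pvS_succ]
    have hrw : pvStep n a0 (pvS n a0 (t+i))
        = pvStep n a0 ((pvS n a0 ((r-1-i)+1)).1, (pvS n a0 (r-1-i)).2) := by rw [h']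
    rw [hrw, pv_revstep n a0 h1 h2 ha0 (r-1-i) hk1]
    have e1 : r - (i+1) = r - 1 - i := by omega
    have e2 : r - 1 - (i+1) = (r - 1 - i) - 1 := by omega
    rw [e1, e2]

-- one unfolding of A's loop in terms of the state sequence
theorem pvAloop_step (n a0 : Int) (fuel k : Nat) (acc : List Int) :
    pvAloop n a0 (fuel+1) (pvS n a0 k).1 (pvS n a0 k).2 (pvQ n a0 k) acc
      = (if pvQ n a0 (k+1) = 2 * a0 then acc ++ [pvQ n a0 (k+1)]
         else pvAloop n a0 fuel (pvS n a0 (k+1)).1 (pvS n a0 (k+1)).2 (pvQ n a0 (k+1))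
           (acc ++ [pvQ n a0 (k+1)])) := rfl

-- one unfolding of B's loop in terms of the state sequence
theorem pvBloop_step (n a0 : Int) (fuel k : Nat) (half : List Int) :
    pvBloop n a0 (fuel+1) (pvS n a0 k).1 (pvS n a0 k).2 (pvQ n a0 k) half
      = (if (pvS n a0 (k+1)).2 = (pvS n a0 k).2 then half ++ half.reverse ++ [2 * a0]
         else if (pvS n a0 (k+1)).1 = (pvS n a0 k).1 then half ++ half.dropLast.reverse ++ [2 * a0]
         else pvBloop n a0 fuel (pvS n a0 (k+1)).1 (pvS n a0 (k+1)).2 (pvQ n a0 (k+1))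
           (half ++ [pvQ n a0 (k+1)])) := rfl

-- characterization of A's loop: it emits the quotients a_{k+1} .. a_p
theorem pvAloop_eq (n a0 : Int) (h1 : a0 * a0 < n) (h2 : n ≤ a0 * a0 + 2 * a0) (ha0 : 1 ≤ a0)
    (p : Nat) (_hp1 : 1 ≤ p) (hpd : (pvS n a0 p).2 = 1)
    (hpmin : ∀ k, 1 ≤ k → k < p → (pvS n a0 k).2 ≠ 1) :
    ∀ fuel k acc, k < p → p ≤ k + fuel →
      pvAloop n a0 fuel (pvS n a0 k).1 (pvS n a0 k).2 (pvQ n a0 k) acc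
        = acc ++ (List.range (p - k)).map (fun i => pvQ n a0 (k+1+i)) := by
  intro fuel
  induction fuel with
  | zero => intro k acc hk hp; omega
  | succ fuel ih =>
    intro k acc hk hp
    rw [pvAloop_step]
    have hiff := pv_a_iff n a0 h1 h2 ha0 (k+1) (by omega)
    by_cases hstop : k + 1 = p
    · rw [if_pos (hiff.mpr (by rw [hstop]; exact hpd))]
      have e1 : p - k = 1 := by omega
      rw [e1]
      simp
    · have hlt : k + 1 < p := by omega
      rw [if_neg (fun hcon => (hpmin (k+1) (by omega) hlt) (hiff.mp hcon))]
      rw [ih (k+1) (acc ++ [pvQ n a0 (k+1)]) hlt (by omega)]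
      rw [List.append_assoc]
      congr 1
      have e : p - k = (p - (k+1)) + 1 := by omega
      rw [e, List.range_succ_eq_map]
      simp only [List.map_cons, List.map_map, List.singleton_append, Nat.add_zero]
      congr 1
      apply List.map_congr_left
      intro i _
      simp only [Function.comp_apply]
      congr 1
      omega

-- characterization of B's loop: it stops at the first symmetry event e and mirrors
theorem pvBloop_eq (n a0 : Int) (_h1 : a0 * a0 < n) (_h2 : n ≤ a0 * a0 + 2 * a0) (_ha0 : 1 ≤ a0)
    (e : Nat) (_he1 : 1 ≤ e)
    (hev : (pvS n a0 e).2 = (pvS n a0 (e-1)).2 ∨ (pvS n a0 e).1 = (pvS n a0 (e-1)).1)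
    (hemin : ∀ k, 1 ≤ k → k < e →
      (pvS n a0 k).2 ≠ (pvS n a0 (k-1)).2 ∧ (pvS n a0 k).1 ≠ (pvS n a0 (k-1)).1) :
    ∀ fuel k, k < e → e ≤ k + fuel →
      pvBloop n a0 fuel (pvS n a0 k).1 (pvS n a0 k).2 (pvQ n a0 k)
          ((List.range k).map (fun i => pvQ n a0 (i+1)))
        = (List.range (e-1)).map (fun i => pvQ n a0 (i+1)) ++
          (if (pvS n a0 e).2 = (pvS n a0 (e-1)).2 then
            ((List.range (e-1)).map (fun i => pvQ n a0 (i+1))).reverse ++ [2 * a0]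
          else
            ((List.range (e-1)).map (fun i => pvQ n a0 (i+1))).dropLast.reverse ++ [2 * a0]) := by
  intro fuel
  induction fuel with
  | zero => intro k hk he'; omega
  | succ fuel ih =>
    intro k hk he'
    rw [pvBloop_step]
    by_cases hd : (pvS n a0 (k+1)).2 = (pvS n a0 k).2
    · have hke : k + 1 = e := by
        by_contra hne
        exact (hemin (k+1) (by omega) (by omega)).1 (by simpa using hd)
      rw [if_pos hd]
      have he1 : e - 1 = k := by omega
      have hcond : (pvS n a0 e).2 = (pvS n a0 (e-1)).2 := by rw [← hke]; simpa using hd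
      rw [if_pos hcond, he1, List.append_assoc]
    · by_cases hm : (pvS n a0 (k+1)).1 = (pvS n a0 k).1
      · have hke : k + 1 = e := by
          by_contra hne
          exact (hemin (k+1) (by omega) (by omega)).2 (by simpa using hm)
        rw [if_neg hd, if_pos hm]
        have he1 : e - 1 = k := by omega
        have hcond : ¬ (pvS n a0 e).2 = (pvS n a0 (e-1)).2 := by rw [← hke]; simpa using hd
        rw [if_neg hcond, he1, List.append_assoc]
      · have hlt : k + 1 < e := by
          rcases Nat.lt_or_ge (k+1) e with h | h
          · exact h
          · exfalso
            have hke : e = k + 1 := by omega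
            rcases hev with hv | hv
            · exact hd (by rw [← hke]; simpa [hke] using hv)
            · exact hm (by rw [← hke]; simpa [hke] using hv)
        rw [if_neg hd, if_neg hm]
        have := ih (k+1) hlt (by omega)
        rw [List.range_succ, List.map_append] at this
        simpa using this

-- the two loop outputs coincide
theorem pv_main (n a0 : Int) (h1 : a0 * a0 < n) (h2 : n ≤ a0 * a0 + 2 * a0) (ha0 : 1 ≤ a0) :
    pvAloop n a0 (2 * n).toNat.succ.succ 0 1 a0 []
      = pvBloop n a0 (2 * n).toNat.succ.succ 0 1 a0 [] := by
  obtain ⟨q, hq1, hqle, hqd⟩ := pv_exists_one n a0 h1 h2 ha0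
  have hexP : ∃ k, 1 ≤ k ∧ (pvS n a0 k).2 = 1 := ⟨q, hq1, hqd⟩
  set p := Nat.find hexP with hpdef
  obtain ⟨hp1, hpd⟩ := Nat.find_spec hexP
  rw [← hpdef] at hp1 hpd
  have hpmin : ∀ k, 1 ≤ k → k < p → (pvS n a0 k).2 ≠ 1 := by
    intro k hk hkp hcon
    exact Nat.find_min hexP hkp ⟨hk, hcon⟩
  have hpq : p ≤ q := Nat.find_min' hexP ⟨hq1, hqd⟩
  have hfuel : (p:Int) < 2 * n := by
    have h2n : 2*a0*a0 < 2*n := by nlinarith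
    have hpq' : (p:Int) ≤ (q:Int) := by exact_mod_cast hpq
    omega
  have hfuelN : p ≤ (2*n).toNat + 1 := by omega
  have hmp_a : (pvS n a0 p).1 = a0 := by
    obtain ⟨hm1, hma, hd1, _, hsum, _⟩ := pvInv_S n a0 h1 h2 ha0 p hp1
    omega
  -- the midpoint symmetry event
  have hEd : ∀ t, p = 2*t+1 → (pvS n a0 (t+1)).2 = (pvS n a0 t).2 := by
    intro t hpt
    have hpal := pv_palin n a0 h1 h2 ha0 p hp1 hpd (t+1) (by omega) (by omega)
    have e1 : p - (t+1) = t := by omega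
    have := congrArg Prod.snd hpal
    simp only at this
    rw [e1] at this
    exact this
  have hEm : ∀ t, p = 2*t → 1 ≤ t → (pvS n a0 (t+1)).1 = (pvS n a0 t).1 := by
    intro t hpt ht1
    have hpal := pv_palin n a0 h1 h2 ha0 p hp1 hpd (t+1) (by omega) (by omega)
    have e1 : p + 1 - (t+1) = t := by omega
    have := congrArg Prod.fst hpal
    simp only at this
    rw [e1] at this
    exact this
  have hexQ : ∃ k, 1 ≤ k ∧
      ((pvS n a0 k).2 = (pvS n a0 (k-1)).2 ∨ (pvS n a0 k).1 = (pvS n a0 (k-1)).1) := by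
    rcases Nat.even_or_odd p with ⟨t, hpt⟩ | ⟨t, hpt⟩
    · exact ⟨t+1, by omega, Or.inr (by simpa using hEm t (by omega) (by omega))⟩
    · exact ⟨t+1, by omega, Or.inl (by simpa using hEd t (by omega))⟩
  set e := Nat.find hexQ with hedef
  obtain ⟨he1, hev⟩ := Nat.find_spec hexQ
  rw [← hedef] at he1 hev
  have hemin : ∀ k, 1 ≤ k → k < e →
      (pvS n a0 k).2 ≠ (pvS n a0 (k-1)).2 ∧ (pvS n a0 k).1 ≠ (pvS n a0 (k-1)).1 := by
    intro k hk hke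
    exact ⟨fun hcon => Nat.find_min hexQ hke ⟨hk, Or.inl hcon⟩,
           fun hcon => Nat.find_min hexQ hke ⟨hk, Or.inr hcon⟩⟩
  have heE0 : e ≤ p/2 + 1 := by
    rcases Nat.even_or_odd p with ⟨t, hpt⟩ | ⟨t, hpt⟩
    · have := Nat.find_min' hexQ
        (⟨by omega, Or.inr (by simpa using hEm t (by omega) (by omega))⟩ :
          1 ≤ t+1 ∧ _)
      omega
    · have := Nat.find_min' hexQ (⟨by omega, Or.inl (by simpa using hEd t (by omega))⟩ :
          1 ≤ t+1 ∧ _)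
      omega
  have heE : e ≤ p/2 + 1 := heE0
  clear_value e
  have hep : e ≤ p := by omega
  -- rewrite both loop calls via the characterizations
  have hQ0 : pvQ n a0 0 = a0 := by
    unfold pvQ
    show PySem.Int.floordiv (a0 + (pvS n a0 0).1) (pvS n a0 0).2 = a0
    have e0 : (pvS n a0 0).1 = 0 := rfl
    have e1 : (pvS n a0 0).2 = 1 := rfl
    rw [e0, e1, add_zero, pv_fdiv_one]
  have hA := pvAloop_eq n a0 h1 h2 ha0 p hp1 hpd hpmin ((2*n).toNat.succ.succ) 0 []
    (by omega) (by omega)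
  simp only [show (pvS n a0 0).1 = 0 from rfl, show (pvS n a0 0).2 = 1 from rfl, hQ0,
    List.nil_append, Nat.sub_zero] at hA
  have hfA : (fun i => pvQ n a0 (0+1+i)) = (fun i => pvQ n a0 (i+1)) := by
    funext i; congr 1; omega
  rw [hfA] at hA
  have hB := pvBloop_eq n a0 h1 h2 ha0 e he1 hev hemin ((2*n).toNat.succ.succ) 0
    (by omega) (by omega)
  simp only [show (pvS n a0 0).1 = 0 from rfl, show (pvS n a0 0).2 = 1 from rfl, hQ0,
    List.range_zero, List.map_nil] at hB
  rw [hA, hB]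
  have hQp : pvQ n a0 p = 2 * a0 := (pv_a_iff n a0 h1 h2 ha0 p hp1).mpr hpd
  by_cases hde : (pvS n a0 e).2 = (pvS n a0 (e-1)).2
  · -- d-event: odd period p = 2e-1
    rw [if_pos hde]
    have hrefl := pv_reflect n a0 h1 h2 ha0 e e he1 (Prod.ext rfl hde)
    have hd1 := hrefl (e-1) (le_refl _)
    have e1 : e - (e-1) = 1 := by omega
    have e2 : e - 1 - (e-1) = 0 := by omega
    rw [e1, e2] at hd1
    have hP2e : (pvS n a0 (e+(e-1))).2 = 1 := by
      rw [hd1]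
      rfl
    have hple : p ≤ e + (e-1) := Nat.find_min' hexP ⟨by omega, hP2e⟩
    have hpe : p = 2*e - 1 := by
      rcases Nat.even_or_odd p with ⟨t, hpt⟩ | ⟨t, hpt⟩
      · -- p even: forces n = a0^2+1 and p = 1, contradiction with parity
        exfalso
        have hpval : p = 2*e - 2 := by omega
        have h2e1 : e + (e-1) = p + 1 := by omega
        rw [h2e1] at hP2e
        have hSp1 : pvS n a0 (p+1) = (a0, n - a0*a0) := by
          have hSp : pvS n a0 p = (a0, 1) := Prod.ext hmp_a hpd
          rw [pvS_succ, hSp, pvStep_eq]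
          rw [pv_fdiv_one]
          have efst : (1:Int) * (a0 + a0) - a0 = a0 := by ring
          rw [efst, pv_fdiv_one]
        rw [hSp1] at hP2e
        have hn1 : n - a0*a0 = 1 := hP2e
        have hd1' : (pvS n a0 1).2 = 1 := by rw [pvS_one]; exact hn1
        have : p ≤ 1 := Nat.find_min' hexP ⟨le_refl 1, hd1'⟩
        omega
      · omega
    -- list equality
    apply List.ext_getElem
    · simp only [List.length_map, List.length_range, List.length_append, List.length_reverse,
        List.length_cons, List.length_nil]
      omega
    · intro i hi1 hi2
      simp only [List.length_map, List.length_range] at hi1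
      simp only [List.getElem_map, List.getElem_range]
      rw [List.getElem_append]
      split_ifs with hcase
      · simp only [List.length_map, List.length_range] at hcase
        simp only [List.getElem_map, List.getElem_range]
      · simp only [List.length_map, List.length_range] at hcase
        rw [List.getElem_append]
        split_ifs with hcase2
        · simp only [List.length_map, List.length_range, List.length_reverse] at hcase2
          rw [List.getElem_reverse]
          simp only [List.getElem_map, List.getElem_range, List.length_map, List.length_range]
          have hidx : e - 1 - 1 - (i - (List.length (List.map (fun i => pvQ n a0 (i+1)) (List.range (e-1))))) + 1 = p - (i+1) := by
            simp only [List.length_map, List.length_range]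
            omega
          simp only [List.length_map, List.length_range] at hidx ⊢
          rw [hidx]
          exact pv_apal n a0 h1 h2 ha0 p hp1 hpd (i+1) (by omega) (by omega)
        · simp only [List.length_map, List.length_range, List.length_reverse] at hcase2
          simp only [List.getElem_singleton]
          have hip : i + 1 = p := by omega
          rw [hip, hQp]
  · -- m-event: even period p = 2e-2
    have hme : (pvS n a0 e).1 = (pvS n a0 (e-1)).1 := hev.resolve_left hde
    rw [if_neg hde]
    have he2 : 2 ≤ e := by
      by_contra hcon
      have he1' : e = 1 := by omega
      rw [he1'] at hme
      rw [pvS_one] at hme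
      have : a0 = (pvS n a0 0).1 := by simpa using hme
      have : a0 = 0 := this
      omega
    obtain ⟨e', rfl⟩ : ∃ e', e = e' + 2 := ⟨e - 2, by omega⟩
    have hme' : (pvS n a0 (e'+2)).1 = (pvS n a0 (e'+1)).1 := by simpa using hme
    have hd02 : (pvS n a0 (e'+2)).2 = (pvS n a0 e').2 := by
      have hex1 : (pvS n a0 (e'+1)).2 * (pvS n a0 (e'+2)).2
          = n - (pvS n a0 (e'+2)).1 * (pvS n a0 (e'+2)).1 := pvExact n a0 h1 h2 ha0 (e'+1)
      have hex2 := pvExact n a0 h1 h2 ha0 e'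
      rw [hme'] at hex1
      have hpos : (0:Int) < (pvS n a0 (e'+1)).2 :=
        (pvInv_S n a0 h1 h2 ha0 (e'+1) (by omega)).2.2.1
      have h12 : (pvS n a0 (e'+1)).2 * (pvS n a0 (e'+2)).2
          = (pvS n a0 (e'+1)).2 * (pvS n a0 e').2 := by
        rw [hex1, ← hex2]; ring
      exact mul_left_cancel₀ (by omega) h12
    have hrefl := pv_reflect n a0 h1 h2 ha0 (e'+1) (e'+2) (by omega)
      (by
        have : e' + 1 - 1 = e' := by omega
        rw [this]
        exact Prod.ext hme' hd02)
    have hd1 := hrefl e' (by omega)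
    have e1 : e' + 1 - e' = 1 := by omega
    have e2 : e' + 1 - 1 - e' = 0 := by omega
    rw [e1, e2] at hd1
    have hP2e : (pvS n a0 (e'+2+e')).2 = 1 := by rw [hd1]; rfl
    have hple : p ≤ 2*e' + 2 := by
      have := Nat.find_min' hexP ⟨by omega, hP2e⟩
      omega
    have hpe : p = 2*e' + 2 := by
      rcases Nat.even_or_odd p with ⟨t, hpt⟩ | ⟨t, hpt⟩
      · omega
      · -- p odd: the midpoint event is a d-event at t+1; e < t+1 is impossible
        exfalso
        have hdev := hEd t (by omega)
        rcases Nat.lt_or_ge (e'+2) (t+1) with h | h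
        · omega
        · rcases Nat.eq_or_lt_of_le h with h' | h'
          · exact hde (by rw [← h']; simpa using hdev)
          · have := (hemin (t+1) (by omega) (by omega)).1
            exact this (by simpa using hdev)
    -- dropLast of the half list
    have hdrop : ((List.range (e'+2-1)).map (fun i => pvQ n a0 (i+1))).dropLast
        = (List.range e').map (fun i => pvQ n a0 (i+1)) := by
      have : e' + 2 - 1 = e' + 1 := by omega
      rw [this, List.range_succ, List.map_append]
      simp
    rw [hdrop]
    -- list equality
    apply List.ext_getElem
    · simp only [List.length_map, List.length_range, List.length_append, List.length_reverse,
        List.length_cons, List.length_nil]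
      omega
    · intro i hi1 hi2
      simp only [List.length_map, List.length_range] at hi1
      simp only [List.getElem_map, List.getElem_range]
      rw [List.getElem_append]
      split_ifs with hcase
      · simp only [List.length_map, List.length_range] at hcase
        simp only [List.getElem_map, List.getElem_range]
      · simp only [List.length_map, List.length_range] at hcase
        rw [List.getElem_append]
        split_ifs with hcase2
        · simp only [List.length_map, List.length_range, List.length_reverse] at hcase2
          rw [List.getElem_reverse]
          simp only [List.getElem_map, List.getElem_range, List.length_map, List.length_range]
          have hidx : e' - 1 - (i - (e'+2-1)) + 1 = p - (i+1) := by omega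
          rw [hidx]
          exact pv_apal n a0 h1 h2 ha0 p hp1 hpd (i+1) (by omega) (by omega)
        · simp only [List.length_map, List.length_range, List.length_reverse] at hcase2
          simp only [List.getElem_singleton]
          have hip : i + 1 = p := by omega
          rw [hip, hQp]

theorem period_root_continued_fraction_spec_aux (n : Int) (hn : 0 ≤ n) :
    period_root_continued_fraction n = period_root_continued_fraction_alt n := by
  unfold period_root_continued_fraction period_root_continued_fraction_alt is_perfect_square
  rw [if_neg (by omega : ¬ n < 0)]
  simp only []
  by_cases hsq : Int.sqrt n * Int.sqrt n = n
  · simp [hsq]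
  · rw [if_neg (by simpa using hsq), if_neg (by simpa using hsq)]
    set a0 := Int.sqrt n with ha0
    have hle : a0 * a0 ≤ n := by
      have h := Nat.sqrt_le' n.toNat
      have : a0 = (Nat.sqrt n.toNat : Int) := by
        rw [ha0]; simp [Int.sqrt]
      rw [this]
      have hcast : ((Nat.sqrt n.toNat : Int)) ^ 2 ≤ ((n.toNat : Nat) : Int) := by
        exact_mod_cast h
      rw [Int.toNat_of_nonneg hn, pow_two] at hcast
      exact hcast
    have hlt : n < (a0 + 1) * (a0 + 1) := by
      have h := Nat.lt_succ_sqrt' n.toNat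
      have : a0 = (Nat.sqrt n.toNat : Int) := by
        rw [ha0]; simp [Int.sqrt]
      rw [this]
      have hcast : ((n.toNat : Nat) : Int) < ((Nat.sqrt n.toNat : Int) + 1) ^ 2 := by
        exact_mod_cast h
      rw [Int.toNat_of_nonneg hn, pow_two] at hcast
      exact hcast
    have ha0nn : 0 ≤ a0 := Int.sqrt_nonneg n
    have h1 : a0 * a0 < n := lt_of_le_of_ne hle hsq
    have h2 : n ≤ a0 * a0 + 2 * a0 := by nlinarith
    have ha01 : 1 ≤ a0 := by nlinarith
    exact pv_main n a0 h1 h2 ha01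

-- ===== VERDICT (by name: the statement is the Claim_ definition above) =====
theorem period_root_continued_fraction_spec : Claim_equal_period_root_continued_fraction := by
  intro n _ hpre
  exact period_root_continued_fraction_spec_aux n hpre
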